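-- pv_equiv track=rewrite | github.com/nikunjpanchal22/code_clone_classification | python_t4_full/Clone_229.py | get_most_ooo_word
-- ===== SOURCE A (Python) =====
-- def get_most_ooo_word(words_string):
--     wordlist = words_string.split()
--     most = [wordlist[0]]
--     count = most[0].count('o')
--     for word in wordlist[1:]:
--         ocount = word.count('o')
--         if ocount > count:
--             most = [word]
--             count = ocount
--         elif ocount == count:
--             most.append(word)
--     return most
-- ===== SOURCE B (Python) =====
-- def get_most_ooo_word(words_string):
--     wordlist = words_string.split()
--     counts = [w.count('o') for w in wordlist]
--     m = max(counts)
--     return [w for w, c in zip(wordlist, counts) if c == m]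
-- ===== Notes on version B (the rewrite author's own statement) =====
-- stated objective: simpler
-- what changed: Replaces the stateful best-so-far loop (reset/append on compare) with a counts list, a single max, and a filter pass.
-- outside the precondition, e.g. on get_most_ooo_word('  '): A raises IndexError, B raises ValueError
import Mathlib
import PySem

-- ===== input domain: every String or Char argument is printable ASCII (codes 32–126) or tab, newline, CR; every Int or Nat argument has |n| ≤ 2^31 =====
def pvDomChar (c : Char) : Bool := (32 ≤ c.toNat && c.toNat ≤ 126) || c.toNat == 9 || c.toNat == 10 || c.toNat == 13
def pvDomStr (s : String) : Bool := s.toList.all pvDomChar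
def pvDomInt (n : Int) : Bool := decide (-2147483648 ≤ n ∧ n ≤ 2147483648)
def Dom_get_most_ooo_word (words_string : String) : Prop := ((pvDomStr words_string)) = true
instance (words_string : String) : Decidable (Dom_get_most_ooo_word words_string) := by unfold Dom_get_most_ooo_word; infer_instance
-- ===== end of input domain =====

-- B replaces A's stateful reset/append loop by counts + max + filter (objective: simpler).

-- ===== PORT A =====
def get_most_ooo_word (words_string : String) : List String :=
  let wordlist := PySem.Str.split₀ words_string
  match wordlist with
  | [] => []  -- Python raises IndexError here; excluded by Pre_
  | w0 :: rest =>
    let st := rest.foldl (fun (st : List String × Nat) word =>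
      let ocount := PySem.Str.count word "o"
      if ocount > st.2 then ([word], ocount)
      else if ocount == st.2 then (st.1 ++ [word], st.2)
      else st) ([w0], PySem.Str.count w0 "o")
    st.1

-- ===== PORT B =====
def get_most_ooo_word_alt (words_string : String) : List String :=
  let wordlist := PySem.Str.split₀ words_string
  let counts := wordlist.map (fun w => PySem.Str.count w "o")
  match PySem.List.max? counts (fun c => c) with
  | none => []  -- Python raises ValueError here; excluded by Pre_
  | some m => (wordlist.zip counts).filterMap (fun wc => if wc.2 == m then some wc.1 else none)

-- ===== PRECONDITION & SPEC =====
-- Pre_ excludes empty/whitespace-only strings: there A raises IndexError (and B ValueError).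
def Pre_get_most_ooo_word (words_string : String) : Prop := PySem.Str.split₀ words_string ≠ []
instance (words_string : String) : Decidable (Pre_get_most_ooo_word words_string) := by unfold Pre_get_most_ooo_word; infer_instance
def pvWitness_get_most_ooo_word : String := "foo bar oo"
def Spec_get_most_ooo_word (words_string : String) (out : List String) : Prop := out = get_most_ooo_word_alt words_string
instance (words_string : String) (out : List String) : Decidable (Spec_get_most_ooo_word words_string out) := by unfold Spec_get_most_ooo_word; infer_instance

-- ===== CLAIM (what is proved, stated in full; the proofs are below) =====
def Claim_equal_get_most_ooo_word : Prop := ∀ (words_string : String), Dom_get_most_ooo_word words_string → Pre_get_most_ooo_word words_string → Spec_get_most_ooo_word words_string (get_most_ooo_word words_string)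

-- ===== LEMMAS AND PROOFS =====

-- the loop body of port A, with the o-counting function abstracted for the proofs
def pvStepA (f : String → Nat) (st : List String × Nat) (word : String) : List String × Nat :=
  let ocount := f word
  if ocount > st.2 then ([word], ocount)
  else if ocount == st.2 then (st.1 ++ [word], st.2)
  else st

theorem pvStepA_gt (f : String → Nat) (most : List String) (c : Nat) (w : String)
    (h : c < f w) : pvStepA f (most, c) w = ([w], f w) := by
  simp only [pvStepA, beq_iff_eq]; split_ifs <;> first | rfl | omega

theorem pvStepA_eq (f : String → Nat) (most : List String) (c : Nat) (w : String)
    (h : f w = c) : pvStepA f (most, c) w = (most ++ [w], c) := by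
  simp only [pvStepA, beq_iff_eq]; split_ifs <;> first | rfl | omega

theorem pvStepA_lt (f : String → Nat) (most : List String) (c : Nat) (w : String)
    (h : f w < c) : pvStepA f (most, c) w = (most, c) := by
  simp only [pvStepA, beq_iff_eq]; split_ifs <;> first | rfl | omega

theorem pvFoldMaxLe (f : String → Nat) (ws : List String) (a : Nat) :
    a ≤ ws.foldl (fun acc w => max acc (f w)) a := by
  induction ws generalizing a with
  | nil => simp
  | cons x xs ih =>
    simp only [List.foldl_cons]
    exact le_trans (le_max_left a (f x)) (ih (max a (f x)))

-- characterisation of A's loop: starting from (most, c), the final collection is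
-- most (kept iff c is still the overall max) followed by the tail's words of maximal count.
theorem pvLoopA (f : String → Nat) (rest : List String) (most : List String) (c : Nat) :
    rest.foldl (pvStepA f) (most, c) =
      (let m := rest.foldl (fun a w => max a (f w)) c
       ((if c = m then most else []) ++ rest.filter (fun w => f w == m), m)) := by
  induction rest generalizing most c with
  | nil => simp
  | cons w ws ih =>
    simp only [List.foldl_cons]
    rcases Nat.lt_trichotomy c (f w) with h1 | h1 | h1
    · rw [pvStepA_gt f most c w h1, ih]
      have hm : max c (f w) = f w := by omega
      simp only [hm]
      generalize hM : ws.foldl (fun a w => max a (f w)) (f w) = M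
      have hc : c ≠ M := by
        have := pvFoldMaxLe f ws (f w); rw [hM] at this; omega
      simp only [List.filter_cons, if_neg hc]
      by_cases h2 : f w = M <;> simp [h2]
    · rw [pvStepA_eq f most c w h1.symm, ih]
      have hm : max c (f w) = c := by omega
      simp only [hm, List.filter_cons]
      generalize ws.foldl (fun a w => max a (f w)) c = M
      by_cases h3 : c = M <;> simp [h3, ← h1]
    · rw [pvStepA_lt f most c w h1, ih]
      have hm : max c (f w) = c := by omega
      simp only [hm, List.filter_cons]
      generalize hM : ws.foldl (fun a w => max a (f w)) c = M
      have hc : f w ≠ M := by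
        have := pvFoldMaxLe f ws c; rw [hM] at this; omega
      simp [hc]

-- filtering the zip of words with their mapped counts is filtering the words by count
theorem pvZipFilter (f : String → Nat) (ws : List String) (m : Nat) :
    ((ws.zip (ws.map f)).filterMap
        (fun wc => if wc.2 == m then some wc.1 else none)) =
      ws.filter (fun w => f w == m) := by
  induction ws with
  | nil => rfl
  | cons w t ih =>
    simp only [List.map_cons, List.zip_cons_cons, List.filterMap_cons, List.filter_cons]
    simp only [beq_iff_eq] at ih
    by_cases h : f w = m <;> simp [h, ih]

-- ===== VERDICT (by name: the statement is the Claim_ definition above) =====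
theorem get_most_ooo_word_spec : Claim_equal_get_most_ooo_word := by
  intro s _ hpre
  unfold Spec_get_most_ooo_word get_most_ooo_word get_most_ooo_word_alt
  cases h : PySem.Str.split₀ s with
  | nil => exact absurd h hpre
  | cons w0 rest =>
    simp only [List.map_cons, PySem.List.max?_id_cons]
    have hstep : rest.foldl (fun (st : List String × Nat) word =>
        let ocount := PySem.Str.count word "o"
        if ocount > st.2 then ([word], ocount)
        else if ocount == st.2 then (st.1 ++ [word], st.2)
        else st) ([w0], PySem.Str.count w0 "o") =
        rest.foldl (pvStepA (fun w => PySem.Str.count w "o")) ([w0], PySem.Str.count w0 "o") := rfl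
    rw [hstep, pvLoopA]
    have hfold : (rest.map (fun w => PySem.Str.count w "o")).foldl max (PySem.Str.count w0 "o")
        = rest.foldl (fun a w => max a (PySem.Str.count w "o")) (PySem.Str.count w0 "o") := by
      rw [List.foldl_map]
    rw [hfold]
    set m := rest.foldl (fun a w => max a (PySem.Str.count w "o")) (PySem.Str.count w0 "o") with hm
    simp only [List.zip_cons_cons, List.filterMap_cons, pvZipFilter]
    by_cases h0 : PySem.Chars.count w0.toList ['o'] = m <;> simp [h0]
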